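-- pv_equiv track=rewrite | github.com/JChanceLive/focusboard | mac/parsers.py | parse_focus
-- ===== SOURCE A (Python) =====
-- def parse_focus(content: str) -> dict:
--     """Parse focus.md for tomorrow's focus."""
--     result = {
--         "task": "",
--         "action": "",
--         "one_thing": "",
--         "file": "",
--     }
--
--     if not content:
--         return result
--
--     for line in content.splitlines():
--         stripped = line.strip()
--         if stripped.startswith("**Video:**"):
--             result["task"] = stripped.replace("**Video:**", "").strip()
--         elif stripped.startswith("**Action:**"):
--             result["action"] = stripped.replace("**Action:**", "").strip()
--         elif stripped.startswith("**File:**"):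
--             result["file"] = stripped.replace("**File:**", "").strip()
--
--     # Parse "The ONE Thing" section
--     in_one_thing = False
--     for line in content.splitlines():
--         stripped = line.strip()
--         if "## The ONE Thing" in stripped:
--             in_one_thing = True
--             continue
--         if in_one_thing and stripped.startswith("**") and stripped.endswith("**"):
--             result["one_thing"] = stripped.strip("*").strip()
--             break
--
--     return result
-- ===== SOURCE B (Python) =====
-- def parse_focus(content: str) -> dict:
--     """Parse focus.md for tomorrow's focus (single pass over the lines)."""
--     task = action = one_thing = file = ""
--     in_one = False
--     captured = False
--     for line in content.splitlines():
--         s = line.strip()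
--         if s.startswith("**Video:**"):
--             task = s.replace("**Video:**", "").strip()
--         elif s.startswith("**Action:**"):
--             action = s.replace("**Action:**", "").strip()
--         elif s.startswith("**File:**"):
--             file = s.replace("**File:**", "").strip()
--         if "## The ONE Thing" in s:
--             in_one = True
--         elif in_one and not captured and s.startswith("**") and s.endswith("**"):
--             one_thing = s.strip("*").strip()
--             captured = True
--     return {"task": task, "action": action, "one_thing": one_thing, "file": file}
-- ===== Notes on version B (the rewrite author's own statement) =====
-- stated objective: alternative
-- what changed: Replaces A's dict mutated by two separate full passes over the lines (the second restarting from the top to find the ONE Thing) with a single fused pass carrying plain scalar state (four fields plus in_one/captured flags).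
import Mathlib
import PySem

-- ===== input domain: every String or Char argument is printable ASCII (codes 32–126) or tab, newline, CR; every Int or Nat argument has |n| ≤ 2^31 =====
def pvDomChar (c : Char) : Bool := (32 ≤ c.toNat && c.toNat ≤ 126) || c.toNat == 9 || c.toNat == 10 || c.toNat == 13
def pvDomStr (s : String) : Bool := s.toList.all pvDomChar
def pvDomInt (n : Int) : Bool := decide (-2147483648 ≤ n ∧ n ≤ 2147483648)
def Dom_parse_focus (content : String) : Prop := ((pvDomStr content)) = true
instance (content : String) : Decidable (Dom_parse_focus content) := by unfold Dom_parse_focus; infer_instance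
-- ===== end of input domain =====

-- B fuses A's two passes over content.splitlines() into one pass over scalar state (alternative decomposition: one traversal instead of two, no dict).

-- ===== PORT A =====
-- A's second loop ("The ONE Thing" section) with its break, as structural recursion.
def parse_focus_go2 (lines : List String) (inOne : Bool) (d : PySem.Dict String String) :
    PySem.Dict String String :=
  match lines with
  | [] => d
  | line :: rest =>
    let stripped := PySem.Str.strip line
    if PySem.Str.isIn "## The ONE Thing" stripped then
      parse_focus_go2 rest true d
    else if inOne && PySem.Str.startswith stripped "**" && PySem.Str.endswith stripped "**" then
      d.insert "one_thing" (PySem.Str.strip (PySem.Str.stripChars stripped "*"))   -- break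
    else
      parse_focus_go2 rest inOne d

def parse_focus (content : String) : List (String × String) :=
  let result : PySem.Dict String String :=
    PySem.Dict.ofList [("task", ""), ("action", ""), ("one_thing", ""), ("file", "")]
  if content = "" then result.items
  else
    let result := (PySem.Str.splitlines content).foldl (fun d line =>
      let stripped := PySem.Str.strip line
      if PySem.Str.startswith stripped "**Video:**" then
        d.insert "task" (PySem.Str.strip (PySem.Str.replace stripped "**Video:**" ""))
      else if PySem.Str.startswith stripped "**Action:**" then
        d.insert "action" (PySem.Str.strip (PySem.Str.replace stripped "**Action:**" ""))
      else if PySem.Str.startswith stripped "**File:**" then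
        d.insert "file" (PySem.Str.strip (PySem.Str.replace stripped "**File:**" ""))
      else d) result
    (parse_focus_go2 (PySem.Str.splitlines content) false result).items

-- ===== PORT B =====
-- state: (task, action, one_thing, file, in_one, captured)
def parse_focus_alt (content : String) : List (String × String) :=
  let st := (PySem.Str.splitlines content).foldl
    (fun st line =>
      let s := PySem.Str.strip line
      let fields : String × String × String :=
        if PySem.Str.startswith s "**Video:**" then
          (PySem.Str.strip (PySem.Str.replace s "**Video:**" ""), st.2.1, st.2.2.2.1)
        else if PySem.Str.startswith s "**Action:**" then
          (st.1, PySem.Str.strip (PySem.Str.replace s "**Action:**" ""), st.2.2.2.1)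
        else if PySem.Str.startswith s "**File:**" then
          (st.1, st.2.1, PySem.Str.strip (PySem.Str.replace s "**File:**" ""))
        else (st.1, st.2.1, st.2.2.2.1)
      let ot : String × Bool × Bool :=
        if PySem.Str.isIn "## The ONE Thing" s then
          (st.2.2.1, true, st.2.2.2.2.2)
        else if st.2.2.2.2.1 && !st.2.2.2.2.2
            && PySem.Str.startswith s "**" && PySem.Str.endswith s "**" then
          (PySem.Str.strip (PySem.Str.stripChars s "*"), st.2.2.2.2.1, true)
        else (st.2.2.1, st.2.2.2.2.1, st.2.2.2.2.2)
      (fields.1, fields.2.1, ot.1, fields.2.2, ot.2.1, ot.2.2))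
    ("", "", "", "", false, false)
  [("task", st.1), ("action", st.2.1), ("one_thing", st.2.2.1), ("file", st.2.2.2.1)]

-- ===== PRECONDITION & SPEC =====
def Spec_parse_focus (content : String) (out : List (String × String)) : Prop := out = parse_focus_alt content
instance (content : String) (out : List (String × String)) : Decidable (Spec_parse_focus content out) := by unfold Spec_parse_focus; infer_instance

-- ===== CLAIM (what is proved, stated in full; the proofs are below) =====
def Claim_equal_parse_focus : Prop := ∀ (content : String), Dom_parse_focus content → Spec_parse_focus content (parse_focus content)

-- ===== LEMMAS AND PROOFS =====

-- scalar models of the individual fields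
def pvT (ls : List String) (t : String) : String :=
  ls.foldl (fun t line =>
    let s := PySem.Str.strip line
    if PySem.Str.startswith s "**Video:**" then PySem.Str.strip (PySem.Str.replace s "**Video:**" "") else t) t

def pvA (ls : List String) (a : String) : String :=
  ls.foldl (fun a line =>
    let s := PySem.Str.strip line
    if PySem.Str.startswith s "**Video:**" then a
    else if PySem.Str.startswith s "**Action:**" then PySem.Str.strip (PySem.Str.replace s "**Action:**" "") else a) a

def pvF (ls : List String) (f : String) : String :=
  ls.foldl (fun f line =>
    let s := PySem.Str.strip line
    if PySem.Str.startswith s "**Video:**" then f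
    else if PySem.Str.startswith s "**Action:**" then f
    else if PySem.Str.startswith s "**File:**" then PySem.Str.strip (PySem.Str.replace s "**File:**" "") else f) f

-- A's second pass, one_thing component only
def pvOneA (ls : List String) (inOne : Bool) (o : String) : String :=
  match ls with
  | [] => o
  | line :: rest =>
    let s := PySem.Str.strip line
    if PySem.Str.isIn "## The ONE Thing" s then pvOneA rest true o
    else if inOne && PySem.Str.startswith s "**" && PySem.Str.endswith s "**" then
      PySem.Str.strip (PySem.Str.stripChars s "*")
    else pvOneA rest inOne o

-- B's one-thing state machine: (one_thing, in_one, captured)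
def pvOneB (ls : List String) (inOne cap : Bool) (o : String) : String × Bool × Bool :=
  match ls with
  | [] => (o, inOne, cap)
  | line :: rest =>
    let s := PySem.Str.strip line
    if PySem.Str.isIn "## The ONE Thing" s then pvOneB rest true cap o
    else if inOne && !cap && PySem.Str.startswith s "**" && PySem.Str.endswith s "**" then
      pvOneB rest inOne true (PySem.Str.strip (PySem.Str.stripChars s "*"))
    else pvOneB rest inOne cap o

-- one-step unfoldings
theorem pvT_cons (line : String) (rest : List String) (t : String) :
    pvT (line :: rest) t
    = pvT rest (if PySem.Str.startswith (PySem.Str.strip line) "**Video:**" then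
        PySem.Str.strip (PySem.Str.replace (PySem.Str.strip line) "**Video:**" "") else t) := rfl

theorem pvA_cons (line : String) (rest : List String) (a : String) :
    pvA (line :: rest) a
    = pvA rest (if PySem.Str.startswith (PySem.Str.strip line) "**Video:**" then a
        else if PySem.Str.startswith (PySem.Str.strip line) "**Action:**" then
          PySem.Str.strip (PySem.Str.replace (PySem.Str.strip line) "**Action:**" "") else a) := rfl

theorem pvF_cons (line : String) (rest : List String) (f : String) :
    pvF (line :: rest) f
    = pvF rest (if PySem.Str.startswith (PySem.Str.strip line) "**Video:**" then f
        else if PySem.Str.startswith (PySem.Str.strip line) "**Action:**" then f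
        else if PySem.Str.startswith (PySem.Str.strip line) "**File:**" then
          PySem.Str.strip (PySem.Str.replace (PySem.Str.strip line) "**File:**" "") else f) := rfl

-- inserting a known key into the 4-key dict
theorem ins_task (t a o f v : String) :
    (PySem.Dict.mk [("task",t),("action",a),("one_thing",o),("file",f)]).insert "task" v
    = PySem.Dict.mk [("task",v),("action",a),("one_thing",o),("file",f)] := by
  simp [PySem.Dict.insert, PySem.Dict.contains]

theorem ins_action (t a o f v : String) :
    (PySem.Dict.mk [("task",t),("action",a),("one_thing",o),("file",f)]).insert "action" v
    = PySem.Dict.mk [("task",t),("action",v),("one_thing",o),("file",f)] := by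
  simp [PySem.Dict.insert, PySem.Dict.contains]

theorem ins_one (t a o f v : String) :
    (PySem.Dict.mk [("task",t),("action",a),("one_thing",o),("file",f)]).insert "one_thing" v
    = PySem.Dict.mk [("task",t),("action",a),("one_thing",v),("file",f)] := by
  simp [PySem.Dict.insert, PySem.Dict.contains]

theorem ins_file (t a o f v : String) :
    (PySem.Dict.mk [("task",t),("action",a),("one_thing",o),("file",f)]).insert "file" v
    = PySem.Dict.mk [("task",t),("action",a),("one_thing",o),("file",v)] := by
  simp [PySem.Dict.insert, PySem.Dict.contains]

theorem pvOneB_cap (ls : List String) (inOne : Bool) (o : String) :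
    pvOneB ls inOne true o = (o, (pvOneB ls inOne true o).2.1, true) := by
  induction ls generalizing inOne with
  | nil => rfl
  | cons line rest ih =>
    simp only [pvOneB]
    split_ifs with h1 h2
    · exact ih true
    · simp at h2
    · exact ih inOne

theorem pvOneB_eq_oneA (ls : List String) (inOne : Bool) (o : String) :
    (pvOneB ls inOne false o).1 = pvOneA ls inOne o := by
  induction ls generalizing inOne o with
  | nil => rfl
  | cons line rest ih =>
    simp only [pvOneB, pvOneA]
    split_ifs with h1 h2 h3
    · exact ih true o
    · rw [pvOneB_cap]
    · simp_all
    · simp_all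
    · exact ih inOne o

-- A's first pass keeps the 4-key dict shape and computes the three field folds
theorem pass1_shape (ls : List String) (t a o f : String) :
    ls.foldl (fun d line =>
      let stripped := PySem.Str.strip line
      if PySem.Str.startswith stripped "**Video:**" then
        d.insert "task" (PySem.Str.strip (PySem.Str.replace stripped "**Video:**" ""))
      else if PySem.Str.startswith stripped "**Action:**" then
        d.insert "action" (PySem.Str.strip (PySem.Str.replace stripped "**Action:**" ""))
      else if PySem.Str.startswith stripped "**File:**" then
        d.insert "file" (PySem.Str.strip (PySem.Str.replace stripped "**File:**" ""))
      else d)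
      (PySem.Dict.mk [("task", t), ("action", a), ("one_thing", o), ("file", f)])
    = PySem.Dict.mk [("task", pvT ls t), ("action", pvA ls a), ("one_thing", o), ("file", pvF ls f)] := by
  induction ls generalizing t a f with
  | nil => rfl
  | cons line rest ih =>
    simp only [List.foldl_cons, pvT_cons, pvA_cons, pvF_cons]
    split_ifs with h1 h2 h3
    · rw [ins_task]; exact ih _ _ _
    · rw [ins_action]; exact ih _ _ _
    · rw [ins_file]; exact ih _ _ _
    · exact ih _ _ _

-- A's second pass keeps the shape, touching only "one_thing"
theorem go2_shape (ls : List String) (inOne : Bool) (t a o f : String) :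
    parse_focus_go2 ls inOne (PySem.Dict.mk [("task", t), ("action", a), ("one_thing", o), ("file", f)])
    = PySem.Dict.mk [("task", t), ("action", a), ("one_thing", pvOneA ls inOne o), ("file", f)] := by
  induction ls generalizing inOne with
  | nil => rfl
  | cons line rest ih =>
    simp only [parse_focus_go2, pvOneA]
    split_ifs with h1 h2
    · exact ih true
    · rw [ins_one]
    · exact ih inOne

-- B's fold is the product of the scalar models
theorem foldB_shape (ls : List String) (t a o f : String) (inOne cap : Bool) :
    ls.foldl
      (fun st line =>
        let s := PySem.Str.strip line
        let fields : String × String × String :=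
          if PySem.Str.startswith s "**Video:**" then
            (PySem.Str.strip (PySem.Str.replace s "**Video:**" ""), st.2.1, st.2.2.2.1)
          else if PySem.Str.startswith s "**Action:**" then
            (st.1, PySem.Str.strip (PySem.Str.replace s "**Action:**" ""), st.2.2.2.1)
          else if PySem.Str.startswith s "**File:**" then
            (st.1, st.2.1, PySem.Str.strip (PySem.Str.replace s "**File:**" ""))
          else (st.1, st.2.1, st.2.2.2.1)
        let ot : String × Bool × Bool :=
          if PySem.Str.isIn "## The ONE Thing" s then
            (st.2.2.1, true, st.2.2.2.2.2)
          else if st.2.2.2.2.1 && !st.2.2.2.2.2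
              && PySem.Str.startswith s "**" && PySem.Str.endswith s "**" then
            (PySem.Str.strip (PySem.Str.stripChars s "*"), st.2.2.2.2.1, true)
          else (st.2.2.1, st.2.2.2.2.1, st.2.2.2.2.2)
        (fields.1, fields.2.1, ot.1, fields.2.2, ot.2.1, ot.2.2))
      (t, a, o, f, inOne, cap)
    = (pvT ls t, pvA ls a, (pvOneB ls inOne cap o).1, pvF ls f,
       (pvOneB ls inOne cap o).2.1, (pvOneB ls inOne cap o).2.2) := by
  induction ls generalizing t a o f inOne cap with
  | nil => rfl
  | cons line rest ih =>
    simp only [List.foldl_cons, pvT_cons, pvA_cons, pvF_cons, pvOneB]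
    split_ifs <;> exact ih ..

-- ===== VERDICT (by name: the statement is the Claim_ definition above) =====
theorem parse_focus_spec : Claim_equal_parse_focus := by
  intro content _
  unfold Spec_parse_focus parse_focus parse_focus_alt
  by_cases h : content = ""
  · subst h; decide
  · simp only [if_neg h]
    rw [show PySem.Dict.ofList [("task", ""), ("action", ""), ("one_thing", ""), ("file", "")]
        = PySem.Dict.mk [("task", ""), ("action", ""), ("one_thing", ""), ("file", "")] from rfl]
    rw [pass1_shape, go2_shape, foldB_shape]
    simp [pvOneB_eq_oneA]
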